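-- pv_equiv track=rewrite | github.com/mkdirswk/algorithm | programmers/Python/kakao2017/AutoComplete.py | solution
-- ===== SOURCE A (Python) =====
-- def solution(words):
--     total_count = 0
--     for alpha in words:
--         str_count = 0
--         while True:
--             temp_str = alpha[0:str_count]
--             temp_list = [s for s in words if temp_str in s]
--
--             if len(temp_list) == 1 or temp_str == alpha:
--                 total_count += len(temp_str)
--                 break
--             str_count += 1
--
--
--
--     return total_count
-- ===== SOURCE B (Python) =====
-- def solution(words):
--     # Count, for every distinct nonempty substring, how many words contain it,
--     # then walk each word's prefixes against the counter (no per-prefix scan of words).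
--     counts = {}
--     for w in words:
--         subs = set()
--         for i in range(len(w)):
--             for j in range(i + 1, len(w) + 1):
--                 subs.add(w[i:j])
--         for s in subs:
--             counts[s] = counts.get(s, 0) + 1
--     n = len(words)
--     total = 0
--     for w in words:
--         if n == 1 or w == "":
--             continue
--         ans = len(w)
--         for k in range(1, len(w)):
--             if counts.get(w[:k], 0) == 1:
--                 ans = k
--                 break
--         total += ans
--     return total
-- ===== Notes on version B (the rewrite author's own statement) =====
-- stated objective: faster
-- what changed: Instead of rescanning all words with a substring test for every prefix of every word, B builds one dictionary counting, for each distinct substring, how many words contain it, then walks each word's prefixes with O(1) lookups.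
import Mathlib
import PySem

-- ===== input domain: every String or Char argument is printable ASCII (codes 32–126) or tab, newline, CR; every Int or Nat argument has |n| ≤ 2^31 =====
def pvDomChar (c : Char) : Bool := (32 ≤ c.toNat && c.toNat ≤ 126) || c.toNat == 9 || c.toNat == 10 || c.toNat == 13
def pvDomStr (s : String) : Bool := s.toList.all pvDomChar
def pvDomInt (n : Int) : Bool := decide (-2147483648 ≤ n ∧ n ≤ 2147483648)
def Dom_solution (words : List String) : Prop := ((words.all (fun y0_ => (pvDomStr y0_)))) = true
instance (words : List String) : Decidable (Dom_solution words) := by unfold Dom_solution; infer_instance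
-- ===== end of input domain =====

-- B replaces A's per-prefix scan over all words (with a substring test each) by one
-- dictionary of per-substring word counts built once, then walks each word's prefixes.

-- ===== PORT A =====
-- A's inner 'while True' loop: str_count = k grows by 1 until the prefix alpha[0:k]
-- occurs as a substring of exactly one word, or equals alpha itself.
def solutionLoop (words : List String) (alpha : String) (k : Nat) : Int :=
  let temp_str := PySem.Str.slice alpha (some 0) (some (k : Int))
  let temp_list := words.filter (fun s => PySem.Str.isIn temp_str s)
  if h : (temp_list.length == 1 || temp_str == alpha) = true then
    PySem.Str.len temp_str
  else
    solutionLoop words alpha (k + 1)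
termination_by alpha.toList.length + 1 - k
decreasing_by
  have htemp : temp_str ≠ alpha := by
    intro he
    apply h
    simp [he]
  have hk : k < alpha.toList.length := by
    by_contra hge
    apply htemp
    apply String.toList_inj.mp
    simp only [temp_str, pysem, PySem.Str.toList_slice, PySem.Chars.slice_eq_listSlice,
      PySem.List.slice_zero_start, PySem.List.slice_to_natCast]
    exact List.take_of_length_le (by omega)
  omega

def solution (words : List String) : Int :=
  words.foldl (fun total_count alpha => total_count + solutionLoop words alpha 0) 0

-- ===== PORT B =====
-- the set of (nonempty) substrings of one word
def altSubs (w : String) : PySem.Set String :=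
  (PySem.List.pyRange 0 (PySem.Str.len w) 1).foldl (fun subs i =>
    (PySem.List.pyRange (i + 1) (PySem.Str.len w + 1) 1).foldl (fun subs j =>
      PySem.Set.add subs (PySem.Str.slice w (some i) (some j))) subs) PySem.Set.empty

-- counts[s] = number of words having s as a substring
def altCounts (words : List String) : PySem.Dict String Int :=
  words.foldl (fun counts w =>
    (altSubs w).foldl (fun counts s => counts.insert s (counts.getD s 0 + 1)) counts)
    PySem.Dict.empty

-- B's 'for k in range(1, len(w)): … break' loop
def altFind (counts : PySem.Dict String Int) (w : String) : List Int → Int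
  | [] => PySem.Str.len w
  | k :: rest =>
    if (counts.getD (PySem.Str.slice w none (some k)) 0 == 1) = true then k
    else altFind counts w rest

def solution_alt (words : List String) : Int :=
  let counts := altCounts words
  let n := words.length
  words.foldl (fun total w =>
    if (n == 1 || w == "") = true then total
    else total + altFind counts w (PySem.List.pyRange 1 (PySem.Str.len w) 1)) 0

-- ===== PRECONDITION & SPEC =====
def Spec_solution (words : List String) (out : Int) : Prop := out = solution_alt words
instance (words : List String) (out : Int) : Decidable (Spec_solution words out) := by unfold Spec_solution; infer_instance

-- ===== CLAIM (what is proved, stated in full; the proofs are below) =====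
def Claim_equal_solution : Prop := ∀ (words : List String), Dom_solution words → Spec_solution words (solution words)

-- ===== LEMMAS AND PROOFS =====

-- A's slice alpha[0:k] as a list
theorem toList_prefix_slice (alpha : String) (k : Nat) :
    (PySem.Str.slice alpha (some 0) (some (k : Int))).toList = alpha.toList.take k := by
  rw [PySem.Str.toList_slice, PySem.Chars.slice_eq_listSlice, PySem.List.slice_zero_start,
    PySem.List.slice_to_natCast]

theorem toList_prefix_slice' (alpha : String) (k : Nat) :
    (PySem.Str.slice alpha none (some (k : Int))).toList = alpha.toList.take k := by
  rw [PySem.Str.toList_slice, PySem.Chars.slice_eq_listSlice, PySem.List.slice_to_natCast]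

theorem len_toList (s : String) : PySem.Str.len s = (s.toList.length : Int) := by
  simp [pysem]

-- membership in a fold of Set.add over a list
theorem mem_foldl_add {α β : Type} [BEq α] [LawfulBEq α] (l : List β) (f : β → α)
    (s0 : PySem.Set α) (x : α) :
    x ∈ l.foldl (fun s b => PySem.Set.add s (f b)) s0 ↔ x ∈ s0 ∨ ∃ b ∈ l, x = f b := by
  induction l generalizing s0 with
  | nil => simp
  | cons hd tl ih =>
    simp only [List.foldl_cons, ih, PySem.Set.mem_add, List.mem_cons]
    constructor
    · rintro (h | h)
      · rcases h with h | h
        · exact Or.inl h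
        · exact Or.inr ⟨hd, Or.inl rfl, h⟩
      · rcases h with ⟨b, hb, rfl⟩
        exact Or.inr ⟨b, Or.inr hb, rfl⟩
    · rintro (h | ⟨b, hb | hb, rfl⟩)
      · exact Or.inl (Or.inl h)
      · subst hb; exact Or.inl (Or.inr rfl)
      · exact Or.inr ⟨b, hb, rfl⟩

-- membership in the nested fold of Set.add used by altSubs
theorem mem_foldl_add2 {α β γ : Type} [BEq α] [LawfulBEq α] (L : List β) (R : β → List γ)
    (F : β → γ → α) (s0 : PySem.Set α) (x : α) :
    x ∈ L.foldl (fun s i => (R i).foldl (fun s j => PySem.Set.add s (F i j)) s) s0 ↔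
      x ∈ s0 ∨ ∃ i ∈ L, ∃ j ∈ R i, x = F i j := by
  induction L generalizing s0 with
  | nil => simp
  | cons hd tl ih =>
    simp only [List.foldl_cons, ih, mem_foldl_add, List.mem_cons]
    constructor
    · rintro (h | h)
      · rcases h with h | ⟨j, hj, rfl⟩
        · exact Or.inl h
        · exact Or.inr ⟨hd, Or.inl rfl, j, hj, rfl⟩
      · rcases h with ⟨i, hi, j, hj, rfl⟩
        exact Or.inr ⟨i, Or.inr hi, j, hj, rfl⟩
    · rintro (h | ⟨i, hi | hi, j, hj, rfl⟩)
      · exact Or.inl (Or.inl h)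
      · subst hi; exact Or.inl (Or.inr ⟨j, hj, rfl⟩)
      · exact Or.inr ⟨i, hi, j, hj, rfl⟩

-- a fold of Set.add keeps the set duplicate-free
theorem nodup_foldl_add {α β : Type} [BEq α] [LawfulBEq α] (l : List β) (f : β → α)
    (s0 : PySem.Set α) (h : s0.Nodup) :
    (l.foldl (fun s b => PySem.Set.add s (f b)) s0).Nodup := by
  induction l generalizing s0 with
  | nil => exact h
  | cons hd tl ih => exact ih _ (PySem.Set.nodup_add _ _ h)

theorem nodup_altSubs (w : String) : (altSubs w).Nodup := by
  unfold altSubs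
  have : ∀ (L : List Int) (s0 : PySem.Set String), s0.Nodup →
      (L.foldl (fun s i =>
        (PySem.List.pyRange (i + 1) (PySem.Str.len w + 1) 1).foldl
          (fun s j => PySem.Set.add s (PySem.Str.slice w (some i) (some j))) s) s0).Nodup := by
    intro L
    induction L with
    | nil => intro s0 h; exact h
    | cons hd tl ih => intro s0 h; exact ih _ (nodup_foldl_add _ _ _ h)
  exact this _ _ List.nodup_nil

-- altSubs w holds exactly the nonempty substrings of w
theorem mem_altSubs (w p : String) :
    p ∈ altSubs w ↔ p.toList ≠ [] ∧ PySem.Str.isIn p w = true := by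
  have hlw : PySem.Str.len w = (w.toList.length : Int) := len_toList w
  have hll : w.toList.length = w.length := by simp
  unfold altSubs
  rw [mem_foldl_add2, PySem.Str.isIn_iff_infix]
  constructor
  · rintro (h | ⟨i, hi, j, hj, rfl⟩)
    · simp [PySem.Set.empty] at h
    · rw [PySem.List.mem_pyRange_one] at hi hj
      have h0i : 0 ≤ i := hi.1
      have h0j : 0 ≤ j := by omega
      constructor
      · have := PySem.Str.toList_slice w (some i) (some j)
        rw [PySem.Chars.slice_eq_listSlice, PySem.List.slice_toNat _ h0i h0j] at this
        intro hnil
        rw [hnil] at this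
        have hlen := congrArg List.length this.symm
        simp [List.length_take, List.length_drop] at hlen
        omega
      · have := PySem.Str.toList_slice w (some i) (some j)
        rw [PySem.Chars.slice_eq_listSlice, PySem.List.slice_toNat _ h0i h0j] at this
        rw [this]
        exact ((List.take_prefix _ _).isInfix.trans (List.drop_suffix _ _).isInfix)
  · rintro ⟨hne, hinf⟩
    right
    rcases hinf with ⟨s, r, hsr⟩
    have hpl : p.toList.length = p.length := by simp
    refine ⟨(s.length : Int), ?_, ((s.length + p.toList.length : Nat) : Int), ?_, ?_⟩
    · rw [PySem.List.mem_pyRange_one]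
      have hlen := congrArg List.length hsr
      simp at hlen
      have hp : 0 < p.toList.length := List.length_pos_of_ne_nil hne
      constructor
      · positivity
      · omega
    · rw [PySem.List.mem_pyRange_one]
      have hlen := congrArg List.length hsr
      simp at hlen
      have hp : 0 < p.toList.length := List.length_pos_of_ne_nil hne
      constructor
      · omega
      · omega
    · apply String.toList_inj.mp
      rw [PySem.Str.toList_slice, PySem.Chars.slice_eq_listSlice,
        PySem.List.slice_toNat _ (by positivity) (by positivity)]
      have h1 : ((s.length : Int)).toNat = s.length := by omega
      have h2 : (((s.length + p.toList.length : Nat) : Int)).toNat = s.length + p.toList.length := by omega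
      rw [h1, h2]
      have hdrop : w.toList.drop s.length = p.toList ++ r := by
        rw [← hsr, List.append_assoc, List.drop_left]
      rw [hdrop]
      simp [List.take_left']

-- the counter built by altCounts gives, for every key, the number of words whose
-- substring set contains it
theorem getD_altCounts (words : List String) (p : String) :
    (altCounts words).getD p 0 =
      (words.countP (fun w => decide (p ∈ altSubs w)) : Int) := by
  unfold altCounts
  have : ∀ (ws : List String) (d : PySem.Dict String Int),
      (ws.foldl (fun counts w =>
        (altSubs w).foldl (fun counts s => counts.insert s (counts.getD s 0 + 1)) counts) d).getD p 0
      = d.getD p 0 + (ws.countP (fun w => decide (p ∈ altSubs w)) : Int) := by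
    intro ws
    induction ws with
    | nil => intro d; simp
    | cons hd tl ih =>
      intro d
      rw [List.foldl_cons, ih, PySem.Dict.getD_foldl_insert_add_one]
      rw [List.countP_cons]
      by_cases hmem : p ∈ altSubs hd
      · have : (altSubs hd).count p = 1 := List.count_eq_one_of_mem (nodup_altSubs hd) hmem
        simp [this, hmem]
        ring
      · have : (altSubs hd).count p = 0 := List.count_eq_zero_of_not_mem hmem
        simp [this, hmem]
  rw [this]
  simp

-- for a nonempty string, the counter value is A's filter count
theorem getD_altCounts_eq_countP (words : List String) (p : String) (hne : p.toList ≠ []) :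
    (altCounts words).getD p 0 =
      (words.countP (fun s => PySem.Str.isIn p s) : Int) := by
  rw [getD_altCounts]
  congr 1
  apply List.countP_congr
  intro w _
  simp only [decide_eq_true_eq, mem_altSubs]
  constructor
  · rintro ⟨_, h⟩; exact h
  · intro h; exact ⟨hne, h⟩

-- A's loop from position k ≥ 1 computes B's prefix walk over range(k, len(alpha))
theorem loop_eq_altFind (words : List String) (alpha : String)
    (k : Nat) (hk1 : 1 ≤ k) (hk2 : k ≤ alpha.toList.length) :
    solutionLoop words alpha k =
      altFind (altCounts words) alpha
        (PySem.List.pyRange (k : Int) (PySem.Str.len alpha) 1) := by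
  induction hd : alpha.toList.length - k generalizing k with
  | zero =>
    have hk : k = alpha.toList.length := by omega
    have htemp : PySem.Str.slice alpha (some 0) (some (k : Int)) = alpha := by
      apply String.toList_inj.mp
      rw [toList_prefix_slice]
      exact List.take_of_length_le (by omega)
    have hr : PySem.List.pyRange (k : Int) (PySem.Str.len alpha) 1 = [] := by
      apply PySem.List.pyRange_one_eq_nil
      rw [len_toList]
      have hll : alpha.toList.length = alpha.length := by simp
      omega
    rw [solutionLoop, hr]
    simp only [htemp, altFind]
    rw [dif_pos (by simp)]
  | succ n ih =>
    have hklt : k < alpha.toList.length := by omega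
    have htne : PySem.Str.slice alpha (some 0) (some (k : Int)) ≠ alpha := by
      intro he
      have h1 := congrArg String.toList he
      rw [toList_prefix_slice] at h1
      have h2 := congrArg List.length h1
      have hll : alpha.toList.length = alpha.length := by simp
      simp at h2
      omega
    have hne : (PySem.Str.slice alpha (some 0) (some (k : Int))).toList ≠ [] := by
      rw [toList_prefix_slice]
      intro h
      have h2 := congrArg List.length h
      rw [List.length_take] at h2
      simp only [List.length_nil] at h2
      omega
    have hslices : PySem.Str.slice alpha none (some (k : Int))
        = PySem.Str.slice alpha (some 0) (some (k : Int)) := by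
      apply String.toList_inj.mp
      rw [toList_prefix_slice, toList_prefix_slice']
    have hcons : PySem.List.pyRange (k : Int) (PySem.Str.len alpha) 1
        = (k : Int) :: PySem.List.pyRange ((k : Int) + 1) (PySem.Str.len alpha) 1 := by
      apply PySem.List.pyRange_one_cons
      rw [len_toList]
      exact_mod_cast hklt
    have hflen : (words.filter
        (fun s => PySem.Str.isIn (PySem.Str.slice alpha (some 0) (some (k : Int))) s)).length
        = words.countP (fun s => PySem.Str.isIn (PySem.Str.slice alpha (some 0) (some (k : Int))) s) :=
      List.countP_eq_length_filter.symm
    rw [solutionLoop, hcons]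
    simp only [altFind]
    rw [hslices, getD_altCounts_eq_countP words _ hne]
    by_cases hc : words.countP
        (fun s => PySem.Str.isIn (PySem.Str.slice alpha (some 0) (some (k : Int))) s) = 1
    · rw [dif_pos ?pos1, if_pos ?pos2]
      case pos1 =>
        simp only [Bool.or_eq_true, beq_iff_eq]
        exact Or.inl (hflen.trans hc)
      case pos2 =>
        simp only [beq_iff_eq]
        exact_mod_cast hc
      rw [len_toList, toList_prefix_slice]
      have hlk : (List.take k alpha.toList).length = k := by
        rw [List.length_take]
        omega
      rw [hlk]
    · rw [dif_neg ?neg1, if_neg ?neg2]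
      case neg1 =>
        simp only [Bool.or_eq_true, beq_iff_eq]
        rintro (h | h)
        · exact hc (hflen.symm.trans h)
        · exact htne h
      case neg2 =>
        simp only [beq_iff_eq]
        intro h
        exact hc (by exact_mod_cast h)
      have := ih (k + 1) (by omega) (by omega) (by omega)
      rw [this]
      norm_num

-- A's whole per-word loop equals B's per-word computation
theorem perWord (words : List String) (alpha : String) :
    solutionLoop words alpha 0 =
      (if (words.length == 1 || alpha == "") = true then 0
       else altFind (altCounts words) alpha
         (PySem.List.pyRange 1 (PySem.Str.len alpha) 1)) := by
  have hsl0 : PySem.Str.slice alpha (some 0) (some ((0 : Nat) : Int)) = "" := by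
    apply String.toList_inj.mp
    rw [toList_prefix_slice]
    rfl
  have hisin : ∀ s ∈ words, PySem.Str.isIn "" s = true := by
    intro s _
    rw [PySem.Str.isIn_iff_infix]
    exact List.nil_infix
  have hfilter : words.filter (fun s => PySem.Str.isIn "" s) = words := by
    rw [List.filter_congr hisin, List.filter_true]
  by_cases h1 : words.length = 1
  · rw [solutionLoop]
    simp only [hsl0, hfilter]
    rw [dif_pos (by simp [h1]), if_pos (by simp [h1]), len_toList]
    rfl
  · by_cases h2 : alpha = ""
    · subst h2
      rw [solutionLoop]
      simp only [hsl0, hfilter]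
      rw [dif_pos (by simp), if_pos (by simp), len_toList]
      rfl
    · rw [if_neg (by simp [h1, h2])]
      rw [solutionLoop]
      simp only [hsl0, hfilter]
      rw [dif_neg ?negc]
      case negc =>
        simp only [Bool.or_eq_true, beq_iff_eq]
        rintro (h | h)
        · exact h1 h
        · exact h2 h.symm
      have h1len : 1 ≤ alpha.toList.length := by
        have hnil : alpha.toList ≠ [] := by simp [h2]
        have := List.length_pos_of_ne_nil hnil
        omega
      have := loop_eq_altFind words alpha 1 le_rfl h1len
      rw [show (((1 : Nat)) : Int) = 1 from by norm_num] at this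
      exact this

-- ===== VERDICT (by name: the statement is the Claim_ definition above) =====
theorem solution_spec : Claim_equal_solution := by
  intro words _
  unfold Spec_solution solution solution_alt
  apply PySem.List.foldl_congr_mem
  intro acc w hw
  rw [perWord]
  by_cases h : (words.length == 1 || w == "") = true
  · simp [h]
  · simp [h]
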